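-- pv_equiv track=rewrite | github.com/Themathematician314/100DaysOfCodeChallengeRePo | RSA_Attempt.py | prime_modulus
-- ===== SOURCE A (Python) =====
-- import math
--
-- def prime_modulus(p, q):
--     space_of_possible_values = []
--     for element in range(3, (p-1)*(q-1)):
--         if math.gcd(element, (p-1)*(q-1)) == 1:
--             space_of_possible_values.append(element)
--         else:
--             pass
--     return space_of_possible_values
-- ===== SOURCE B (Python) =====
-- def prime_modulus(p, q):
--     M = (p - 1) * (q - 1)
--     if M <= 3:
--         return []
--     # factor M once by trial division
--     factors = []
--     m = M
--     d = 2
--     while d * d <= m: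
--         if m % d == 0:
--             factors.append(d)
--             while m % d == 0:
--                 m //= d
--         else:
--             d += 1
--     if m > 1:
--         factors.append(m)
--     # sieve: mark every multiple of a prime factor of M, keep the unmarked
--     ok = bytearray(b"\x01") * M
--     for f in factors:
--         ok[f::f] = bytes(len(range(f, M, f)))
--     return [n for n in range(3, M) if ok[n]]
-- ===== Notes on version B (the rewrite author's own statement) =====
-- stated objective: faster
-- what changed: Instead of computing gcd(n, M) for every n in the range, B factors M = (p-1)(q-1) once by trial division and keeps each n that is divisible by none of M's few prime factors.
import Mathlib
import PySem

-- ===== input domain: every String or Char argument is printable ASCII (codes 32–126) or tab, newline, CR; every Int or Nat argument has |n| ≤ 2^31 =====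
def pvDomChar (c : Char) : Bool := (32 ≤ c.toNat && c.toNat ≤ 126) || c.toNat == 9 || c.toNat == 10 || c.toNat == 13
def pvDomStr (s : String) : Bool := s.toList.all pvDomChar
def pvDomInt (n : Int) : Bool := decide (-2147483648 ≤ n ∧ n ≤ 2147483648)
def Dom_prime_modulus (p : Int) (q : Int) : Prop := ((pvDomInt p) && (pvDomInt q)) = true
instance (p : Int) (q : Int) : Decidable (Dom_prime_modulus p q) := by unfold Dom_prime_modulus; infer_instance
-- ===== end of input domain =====

-- B replaces A's per-element gcd test by factoring M = (p-1)(q-1) once and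
-- sieving out the multiples of its prime factors (measured faster in Python).


-- ===== PORT A =====
-- for element in range(3, (p-1)*(q-1)): if math.gcd(element, (p-1)*(q-1)) == 1: append
def prime_modulus (p : Int) (q : Int) : List Int :=
  (PySem.List.pyRange 3 ((p - 1) * (q - 1)) 1).foldl
    (fun acc element =>
      if Int.gcd element ((p - 1) * (q - 1)) = 1 then acc ++ [element] else acc)
    []

-- ===== PORT B =====
-- inner `while m % d == 0: m //= d` of Source B (the 2 ≤ d / 0 < m conjuncts are
-- termination guards; they hold at every call site, so behaviour is unchanged)
def stripFac (d m : Int) : Int :=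
  if h : 2 ≤ d ∧ 0 < m ∧ PySem.Int.mod m d = 0 then
    stripFac d (PySem.Int.floordiv m d)
  else m
termination_by m.toNat
decreasing_by
  rcases h with ⟨hd, hm, hmod⟩
  rw [PySem.Int.floordiv_eq_ediv_of_pos (by omega)]
  have h1 : 0 ≤ m / d := Int.ediv_nonneg (by omega) (by omega)
  have h2 : m / d < m := by rw [Int.ediv_lt_iff_lt_mul (by omega)]; nlinarith
  omega

-- lemma cited by facLoop's decreasing_by (must precede it)
theorem stripFac_le (d m : Int) (hm : 0 ≤ m) : stripFac d m ≤ m := by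
  fun_induction stripFac d m with
  | case1 m h ih =>
    rcases h with ⟨hd, hm', hmod⟩
    have hle : PySem.Int.floordiv m d ≤ m := by
      rw [PySem.Int.floordiv_eq_ediv_of_pos (by omega)]
      exact Int.ediv_le_self d (by omega)
    have h0 : (0:Int) ≤ PySem.Int.floordiv m d := by
      rw [PySem.Int.floordiv_eq_ediv_of_pos (by omega)]
      exact Int.ediv_nonneg (by omega) (by omega)
    exact le_trans (ih h0) hle
  | case2 => exact le_refl _

theorem stripFac_lt (d m : Int) (hd : 2 ≤ d) (hm : 0 < m)
    (hmod : PySem.Int.mod m d = 0) : stripFac d m < m := by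
  rw [stripFac]
  rw [dif_pos ⟨hd, hm, hmod⟩]
  have h0 : (0:Int) ≤ PySem.Int.floordiv m d := by
    rw [PySem.Int.floordiv_eq_ediv_of_pos (by omega)]
    exact Int.ediv_nonneg (by omega) (by omega)
  have hlt : PySem.Int.floordiv m d < m := by
    rw [PySem.Int.floordiv_eq_ediv_of_pos (by omega)]
    rw [Int.ediv_lt_iff_lt_mul (by omega)]; nlinarith
  exact lt_of_le_of_lt (stripFac_le d _ h0) hlt

-- outer trial-division loop of Source B: returns (prime factors found so far, remaining m)
def facLoop (d m : Int) : List Int × Int :=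
  if h : 2 ≤ d ∧ d * d ≤ m then
    if PySem.Int.mod m d = 0 then
      let r := facLoop d (stripFac d m)
      (d :: r.1, r.2)
    else
      facLoop (d + 1) m
  else ([], m)
termination_by (2 * m - d).toNat
decreasing_by
  · rcases h with ⟨hd, hdm⟩
    have hdd : 2 * d ≤ d * d := by nlinarith
    have hm : 0 < m := by nlinarith
    have := stripFac_lt d m hd hm (by assumption)
    omega
  · rcases h with ⟨hd, hdm⟩
    have hdd : 2 * d ≤ d * d := by nlinarith
    omega

-- Source B: factor, then sieve-mark multiples of each factor, then collect unmarked
def prime_modulus_alt (p : Int) (q : Int) : List Int :=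
  let M := (p - 1) * (q - 1)
  if M ≤ 3 then []
  else
    let fm := facLoop 2 M
    let factors := fm.1 ++ (if 1 < fm.2 then [fm.2] else [])
    let ok : List Bool := List.replicate M.toNat true
    let ok := factors.foldl
      (fun ok f => (PySem.List.pyRange f M f).foldl (fun ok i => ok.set i.toNat false) ok) ok
    (PySem.List.pyRange 3 M 1).filter (fun n => ok.getD n.toNat false)

-- ===== PRECONDITION & SPEC =====
def Spec_prime_modulus (p : Int) (q : Int) (out : List Int) : Prop := out = prime_modulus_alt p q
instance (p : Int) (q : Int) (out : List Int) : Decidable (Spec_prime_modulus p q out) := by unfold Spec_prime_modulus; infer_instance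

-- ===== CLAIM (what is proved, stated in full; the proofs are below) =====
def Claim_equal_prime_modulus : Prop := ∀ (p : Int) (q : Int), Dom_prime_modulus p q → Spec_prime_modulus p q (prime_modulus p q)

-- ===== LEMMAS AND PROOFS =====

theorem stripFac_pos (d m : Int) (hm : 0 < m) : 0 < stripFac d m := by
  fun_induction stripFac d m with
  | case1 m h ih =>
    rcases h with ⟨hd, hm', hmod⟩
    have hdvd : d ∣ m := (PySem.Int.mod_eq_zero_iff_dvd m d).mp hmod
    apply ih
    rw [PySem.Int.floordiv_eq_ediv_of_pos (by omega)]
    rcases hdvd with ⟨c, rfl⟩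
    rw [Int.mul_ediv_cancel_left _ (by omega)]
    nlinarith
  | case2 m h => exact hm

theorem stripFac_dvd (d m : Int) : stripFac d m ∣ m := by
  fun_induction stripFac d m with
  | case1 m h ih =>
    rcases h with ⟨hd, hm', hmod⟩
    have hdvd : d ∣ m := (PySem.Int.mod_eq_zero_iff_dvd m d).mp hmod
    have hq : PySem.Int.floordiv m d ∣ m := by
      rw [PySem.Int.floordiv_eq_ediv_of_pos (by omega)]
      exact Int.ediv_dvd_of_dvd hdvd
    exact dvd_trans ih hq
  | case2 m h => exact dvd_refl _

theorem stripFac_prime_dvd (d m : Int) (pp : Nat) (hp : pp.Prime)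
    (hdvd : (pp:Int) ∣ m) : (pp:Int) ∣ stripFac d m ∨ (pp:Int) ∣ d := by
  have hpZ : Prime (pp:Int) := by rw [Int.prime_iff_natAbs_prime]; simpa using hp
  fun_induction stripFac d m with
  | case1 m h ih =>
    rcases h with ⟨hd, hm', hmod⟩
    have hddm : d ∣ m := (PySem.Int.mod_eq_zero_iff_dvd m d).mp hmod
    have heq : m = d * PySem.Int.floordiv m d := by
      rw [PySem.Int.floordiv_eq_ediv_of_pos (by omega)]
      exact (Int.mul_ediv_cancel' hddm).symm
    rcases (hpZ.dvd_mul.mp (heq ▸ hdvd)) with hcase | hcase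
    · exact Or.inr hcase
    · exact ih hcase
  | case2 m h => exact Or.inl hdvd

theorem facLoop_spec (d m : Int) :
    2 ≤ d → 0 < m → (∀ e : Int, 2 ≤ e → e < d → ¬ e ∣ m) →
    (∀ f ∈ (facLoop d m).1, 2 ≤ f ∧ f ∣ m) ∧
    ((facLoop d m).2 ∣ m) ∧ (0 < (facLoop d m).2) ∧
    (∀ e : Int, 2 ≤ e → e ∣ (facLoop d m).2 → e = (facLoop d m).2) ∧
    (∀ pp : Nat, pp.Prime → (pp:Int) ∣ m →
      ((pp:Int) ∈ (facLoop d m).1 ∨ (pp:Int) ∣ (facLoop d m).2)) := by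
  fun_induction facLoop d m with
  | case1 d m h hmod r ih =>
    intro hd hm H
    rcases h with ⟨hd', hdm⟩
    have hddm : d ∣ m := (PySem.Int.mod_eq_zero_iff_dvd m d).mp hmod
    have hs_dvd : stripFac d m ∣ m := stripFac_dvd d m
    have hs_pos : 0 < stripFac d m := stripFac_pos d m hm
    have H' : ∀ e : Int, 2 ≤ e → e < d → ¬ e ∣ stripFac d m := fun e he hed hde =>
      H e he hed (dvd_trans hde hs_dvd)
    obtain ⟨ih1, ih2, ih3, ih4, ih5⟩ := ih hd hs_pos H'
    refine ⟨?_, dvd_trans ih2 hs_dvd, ih3, ih4, ?_⟩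
    · intro f hf
      rcases List.mem_cons.mp hf with rfl | hf'
      · exact ⟨hd, hddm⟩
      · obtain ⟨h1, h2⟩ := ih1 f hf'
        exact ⟨h1, dvd_trans h2 hs_dvd⟩
    · intro pp hp hppm
      rcases stripFac_prime_dvd d m pp hp hppm with hcase | hcase
      · rcases ih5 pp hp hcase with hin | hdv
        · exact Or.inl (List.mem_cons_of_mem _ hin)
        · exact Or.inr hdv
      · -- pp divides d; with no factor of m below d, pp = d
        have hpp2 : 2 ≤ (pp:Int) := by exact_mod_cast hp.two_le
        have hppm' : (pp:Int) ∣ m := dvd_trans hcase hddm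
        have hnotlt : ¬ (pp:Int) < d := fun hlt => H (pp:Int) hpp2 hlt hppm'
        have hle : (pp:Int) ≤ d := Int.le_of_dvd (by omega) hcase
        have : (pp:Int) = d := by omega
        exact Or.inl (this ▸ List.mem_cons_self)
  | case2 d m h hmod ih =>
    intro hd hm H
    rcases h with ⟨hd', hdm⟩
    have H' : ∀ e : Int, 2 ≤ e → e < d + 1 → ¬ e ∣ m := by
      intro e he hed
      by_cases hcase : e < d
      · exact H e he hcase
      · have : e = d := by omega
        subst this
        intro hdvd
        exact hmod ((PySem.Int.mod_eq_zero_iff_dvd m e).mpr hdvd)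
    exact ih (by omega) hm H'
  | case3 d m h =>
    intro hd hm H
    have hmlt : m < d * d := by
      by_contra hc
      exact h ⟨hd, by omega⟩
    refine ⟨by simp, dvd_refl m, hm, ?_, fun pp _ hdvd => Or.inr hdvd⟩
    intro e he hedvd
    rcases hedvd with ⟨s, hs⟩
    have hs1 : 1 ≤ s := by nlinarith
    by_cases hcase : s = 1
    · simp [hcase] at hs; omega
    · have hs2 : 2 ≤ s := by omega
      by_cases hle : e ≤ s
      · have : e * e ≤ m := by nlinarith
        have helt : e < d := by nlinarith
        exact absurd ⟨s, hs⟩ (H e he helt)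
      · have : s * s ≤ m := by nlinarith
        have hslt : s < d := by nlinarith
        exact absurd ⟨e, by linarith [hs, mul_comm e s]⟩ (H s hs2 hslt)

-- marking a list of nonnegative indices false: the value read afterwards
theorem setFalse_foldl_getD (idx : List Int) (ok : List Bool) (j : Nat)
    (h : ∀ i ∈ idx, 0 ≤ i) :
    (idx.foldl (fun ok i => ok.set i.toNat false) ok).getD j false =
      if (j:Int) ∈ idx ∧ j < ok.length then false else ok.getD j false := by
  induction idx generalizing ok with
  | nil => simp
  | cons i idx' ih =>
    simp only [List.foldl_cons]
    rw [ih _ (fun x hx => h x (List.mem_cons_of_mem _ hx))]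
    have hi : 0 ≤ i := h i List.mem_cons_self
    simp only [List.length_set, List.getD_eq_getElem?_getD, List.getElem?_set, List.mem_cons]
    by_cases hji : i.toNat = j
    · have hji' : (j:Int) = i := by omega
      by_cases hjl : j < ok.length
      · simp [hji, hji', hjl]
      · simp [hji, hji', hjl]
    · have hji' : (j:Int) ≠ i := by omega
      by_cases hmem : (j:Int) ∈ idx'
      · simp [hji, hji', hmem]
      · simp [hji, hji', hmem]

-- nested sieve loop over the factor list
theorem sieve_getD (fs : List Int) (M : Int) (ok : List Bool) (j : Nat)
    (hfs : ∀ f ∈ fs, 0 < f) :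
    (fs.foldl (fun ok f => (PySem.List.pyRange f M f).foldl
        (fun ok i => ok.set i.toNat false) ok) ok).getD j false =
      if (∃ f ∈ fs, (j:Int) ∈ PySem.List.pyRange f M f) ∧ j < ok.length then false
      else ok.getD j false := by
  induction fs generalizing ok with
  | nil => simp
  | cons f fs' ih =>
    simp only [List.foldl_cons]
    have hf : 0 < f := hfs f List.mem_cons_self
    have hidx : ∀ i ∈ PySem.List.pyRange f M f, 0 ≤ i := by
      intro i hi
      have := (PySem.List.mem_pyRange_iff_of_pos hf i).mp hi
      omega
    have hlen : ((PySem.List.pyRange f M f).foldl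
        (fun ok i => ok.set i.toNat false) ok).length = ok.length := by
      clear ih hidx
      induction PySem.List.pyRange f M f generalizing ok with
      | nil => rfl
      | cons x xs ihx => simp only [List.foldl_cons]; rw [ihx]; simp
    rw [ih _ (fun x hx => hfs x (List.mem_cons_of_mem _ hx)), hlen,
        setFalse_foldl_getD _ _ _ hidx]
    try simp only [List.mem_cons]
    by_cases h1 : ∃ g ∈ fs', (j:Int) ∈ PySem.List.pyRange g M g
    · by_cases hjl : j < ok.length
      · simp [h1, hjl]
      · simp [h1, hjl]
    · by_cases h2 : (j:Int) ∈ PySem.List.pyRange f M f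
      · by_cases hjl : j < ok.length
        · simp [h1, h2, hjl]
        · simp [h1, h2, hjl]
      · simp [h1, h2]

-- membership of n in the arithmetic progression f, 2f, … < M is divisibility
theorem mem_mult_range (f M n : Int) (hf : 0 < f) (hn : 0 < n) (hnM : n < M) :
    n ∈ PySem.List.pyRange f M f ↔ f ∣ n := by
  rw [PySem.List.mem_pyRange_iff_of_pos hf]
  constructor
  · rintro ⟨h1, h2, c, hc⟩
    exact ⟨c + 1, by linarith [hc, mul_add f c 1, mul_one f]⟩
  · intro hdvd
    refine ⟨Int.le_of_dvd hn hdvd, hnM, ?_⟩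
    exact (dvd_sub_right hdvd).mpr (dvd_refl f)

-- the factor list of Source B: every member is ≥ 2 and divides M; every prime
-- divisor of M is a member
theorem factors_spec (M : Int) (hM : 0 < M) :
    (∀ f ∈ (facLoop 2 M).1 ++ (if 1 < (facLoop 2 M).2 then [(facLoop 2 M).2] else []),
        2 ≤ f ∧ f ∣ M) ∧
    (∀ pp : Nat, pp.Prime → (pp:Int) ∣ M →
        (pp:Int) ∈ (facLoop 2 M).1 ++ (if 1 < (facLoop 2 M).2 then [(facLoop 2 M).2] else [])) := by
  obtain ⟨h1, h2, h3, h4, h5⟩ := facLoop_spec 2 M (le_refl 2) hM (by intro e he hed; omega)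
  constructor
  · intro f hf
    rcases List.mem_append.mp hf with hf' | hf'
    · exact h1 f hf'
    · split_ifs at hf' with hr
      · rcases List.mem_singleton.mp hf' with rfl
        exact ⟨by omega, h2⟩
      · exact absurd hf' (by simp)
  · intro pp hp hdvd
    rcases h5 pp hp hdvd with hin | hdv
    · exact List.mem_append_left _ hin
    · have hpp2 : 2 ≤ (pp:Int) := by exact_mod_cast hp.two_le
      have heq : (pp:Int) = (facLoop 2 M).2 := h4 (pp:Int) hpp2 hdv
      have hr : 1 < (facLoop 2 M).2 := by omega
      apply List.mem_append_right
      rw [if_pos hr]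
      exact heq ▸ List.mem_singleton.mpr rfl

-- coprimality to M is avoiding every member of the factor list
theorem gcd_one_iff_factors (M n : Int) (hM : 0 < M) (hn : 0 < n) :
    (Int.gcd n M = 1 ↔
      ∀ f ∈ (facLoop 2 M).1 ++ (if 1 < (facLoop 2 M).2 then [(facLoop 2 M).2] else []),
        ¬ f ∣ n) := by
  obtain ⟨hsound, hcomplete⟩ := factors_spec M hM
  constructor
  · intro hgcd f hf hdvd
    obtain ⟨hf2, hfM⟩ := hsound f hf
    have : f ∣ (Int.gcd n M : Int) := Int.dvd_coe_gcd hdvd hfM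
    rw [hgcd] at this
    have := Int.le_of_dvd one_pos this
    omega
  · intro hall
    by_contra hgcd
    have hg0 : Int.gcd n M ≠ 0 := by
      intro h0
      rw [Int.gcd_eq_zero_iff] at h0
      omega
    have hg2 : 2 ≤ Int.gcd n M := by omega
    set g := Int.gcd n M with hg
    have hp := Nat.minFac_prime (by omega : g ≠ 1)
    have hpg : (g.minFac : Int) ∣ (g : Int) := by exact_mod_cast g.minFac_dvd
    have hpn : (g.minFac : Int) ∣ n := dvd_trans hpg (Int.gcd_dvd_left n M)
    have hpM : (g.minFac : Int) ∣ M := dvd_trans hpg (Int.gcd_dvd_right n M)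
    exact hall _ (hcomplete g.minFac hp hpM) hpn

-- ===== VERDICT (by name: the statement is the Claim_ definition above) =====
theorem prime_modulus_spec : Claim_equal_prime_modulus := by
  intro p q _
  unfold Spec_prime_modulus prime_modulus prime_modulus_alt
  set M := (p - 1) * (q - 1) with hM
  rw [PySem.List.foldl_append_ite_eq_filter (fun element => Int.gcd element M = 1)]
  simp only [List.nil_append]
  by_cases hM3 : M ≤ 3
  · rw [if_pos hM3, PySem.List.pyRange_one_eq_nil (by omega)]
    simp
  · rw [if_neg hM3]
    have hM0 : 0 < M := by omega
    apply List.filter_congr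
    intro n hn
    have hnb := PySem.List.mem_pyRange_one.mp hn
    set fs := (facLoop 2 M).1 ++ (if 1 < (facLoop 2 M).2 then [(facLoop 2 M).2] else []) with hfs
    have hfpos : ∀ f ∈ fs, 0 < f := fun f hf => by
      have := ((factors_spec M hM0).1 f hf).1; omega
    rw [sieve_getD fs M _ n.toNat hfpos]
    have hjl : n.toNat < (List.replicate M.toNat true).length := by
      simp [List.length_replicate]; omega
    have hcast : ((n.toNat : Int)) = n := by omega
    have hmem : (∃ f ∈ fs, ((n.toNat : Int)) ∈ PySem.List.pyRange f M f) ↔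
        ¬ (∀ f ∈ fs, ¬ f ∣ n) := by
      rw [hcast]
      push_neg
      constructor
      · rintro ⟨f, hf, hmem⟩
        exact ⟨f, hf, (mem_mult_range f M n (hfpos f hf) (by omega) hnb.2).mp hmem⟩
      · rintro ⟨f, hf, hdvd⟩
        exact ⟨f, hf, (mem_mult_range f M n (hfpos f hf) (by omega) hnb.2).mpr hdvd⟩
    by_cases hc : ∀ f ∈ fs, ¬ f ∣ n
    · have hg : Int.gcd n M = 1 := (gcd_one_iff_factors M n hM0 (by omega)).mpr hc
      rw [if_neg (fun hpos => (hmem.mp hpos.1) hc)]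
      simp only [List.getD_eq_getElem?_getD, List.getElem?_replicate]
      simp [hg, hnb.2, hM0]
    · have hg : Int.gcd n M ≠ 1 := fun h1 =>
        hc ((gcd_one_iff_factors M n hM0 (by omega)).mp h1)
      rw [if_pos ⟨hmem.mpr hc, hjl⟩]
      simp [hg]
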